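-- pv_equiv track=rewrite | github.com/viniciuslidington/Projeto-Contabilidade | backend/app/services/contabilidade.py | categorizar
-- ===== SOURCE A (Python) =====
-- def categorizar(nome):
--     categorias = {
--         "Despesas Operacionais": ["SERVICOS DE PUBLICIDADE E PROP", "MARKETING DIRETO", "SERVICO DE DIVULGACAO",
--                                    "CONSULTORIA", "LICENCA DE USO", "SERVICOS INFORMATICA", "SERVICOS LIMPEZA E CONSERVACAO",
--                                    "CERTIFICADO DIGITAL"],
--         "Despesas Administrativas": ["ALUGUEL DE IMOVEIS", "CONDOMINIO", "ENERGIA ELETRICA", "TELEFONIA MOVEL",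
--                                       "TELEFONIA FIXA", "MATERIAL DE EXPEDIENTE"],
--         "Despesas Financeiras e Tributárias": ["TARIFAS BANCARIAS", "IOF", "JUROS PAGOS", "IRRF APLICACAO FINANCEIRA",
--                                                "SIMPLES NACIONAL", "EMOLUMENTOS CARTORIOS", "TAXAS MUNICIPAIS",
--                                                "CIM CADASTRO INSCRICAO MUNICIP"],
--         "Despesas com Pessoal": ["PRO LABORE", "INSS SOBRE PRO LABORE", "CONFRATERNIZACAO", "CURSOS E TREINAMENTOS",
--                                   "LANCHES E REFEICOES"],
--         "Investimentos e Aplicações": ["APLICACAO ITAU AUTO MAIS", "RESGATE ITAU AUTO MAIS", "RESGATE INTER CDB MAIS",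
--                                         "APLICACAO INTER CDB MAIS", "AJUSTE DE RENDIMENTO APLICACAO",
--                                         "RENDIMENTO DE APLICACOES FINAN", "CONSORCIO ITAU"],
--         "Despesas Eventuais e Diversas": ["ADIANT. DE LUCRO", "ADIANTAMENTO DE CLIENTES", "ENTRADAS DE TRANSFERENCIAS",
--                                            "PAGAMENTOS DIVERSOS", "OUTRAS DESPESAS", "SEGUROS PESSOAIS E EMPRESARIAI",
--                                            "MULTAS PUNITIVAS", "DOACOES E CONTRIBUICOES", "CONDUCAO E TRANSPORTE",
--                                            "IPTU IMP PREDIAL TERRIT URBANO"]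
--     }
--
--     for categoria, itens in categorias.items():
--         if nome in itens:
--             return categoria
--     return "Outros"
-- ===== SOURCE B (Python) =====
-- _LOOKUP = {
--     "SERVICOS DE PUBLICIDADE E PROP": "Despesas Operacionais",
--     "MARKETING DIRETO": "Despesas Operacionais",
--     "SERVICO DE DIVULGACAO": "Despesas Operacionais",
--     "CONSULTORIA": "Despesas Operacionais",
--     "LICENCA DE USO": "Despesas Operacionais",
--     "SERVICOS INFORMATICA": "Despesas Operacionais",
--     "SERVICOS LIMPEZA E CONSERVACAO": "Despesas Operacionais",
--     "CERTIFICADO DIGITAL": "Despesas Operacionais",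
--     "ALUGUEL DE IMOVEIS": "Despesas Administrativas",
--     "CONDOMINIO": "Despesas Administrativas",
--     "ENERGIA ELETRICA": "Despesas Administrativas",
--     "TELEFONIA MOVEL": "Despesas Administrativas",
--     "TELEFONIA FIXA": "Despesas Administrativas",
--     "MATERIAL DE EXPEDIENTE": "Despesas Administrativas",
--     "TARIFAS BANCARIAS": "Despesas Financeiras e Tributárias",
--     "IOF": "Despesas Financeiras e Tributárias",
--     "JUROS PAGOS": "Despesas Financeiras e Tributárias",
--     "IRRF APLICACAO FINANCEIRA": "Despesas Financeiras e Tributárias",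
--     "SIMPLES NACIONAL": "Despesas Financeiras e Tributárias",
--     "EMOLUMENTOS CARTORIOS": "Despesas Financeiras e Tributárias",
--     "TAXAS MUNICIPAIS": "Despesas Financeiras e Tributárias",
--     "CIM CADASTRO INSCRICAO MUNICIP": "Despesas Financeiras e Tributárias",
--     "PRO LABORE": "Despesas com Pessoal",
--     "INSS SOBRE PRO LABORE": "Despesas com Pessoal",
--     "CONFRATERNIZACAO": "Despesas com Pessoal",
--     "CURSOS E TREINAMENTOS": "Despesas com Pessoal",
--     "LANCHES E REFEICOES": "Despesas com Pessoal",
--     "APLICACAO ITAU AUTO MAIS": "Investimentos e Aplicações",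
--     "RESGATE ITAU AUTO MAIS": "Investimentos e Aplicações",
--     "RESGATE INTER CDB MAIS": "Investimentos e Aplicações",
--     "APLICACAO INTER CDB MAIS": "Investimentos e Aplicações",
--     "AJUSTE DE RENDIMENTO APLICACAO": "Investimentos e Aplicações",
--     "RENDIMENTO DE APLICACOES FINAN": "Investimentos e Aplicações",
--     "CONSORCIO ITAU": "Investimentos e Aplicações",
--     "ADIANT. DE LUCRO": "Despesas Eventuais e Diversas",
--     "ADIANTAMENTO DE CLIENTES": "Despesas Eventuais e Diversas",
--     "ENTRADAS DE TRANSFERENCIAS": "Despesas Eventuais e Diversas",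
--     "PAGAMENTOS DIVERSOS": "Despesas Eventuais e Diversas",
--     "OUTRAS DESPESAS": "Despesas Eventuais e Diversas",
--     "SEGUROS PESSOAIS E EMPRESARIAI": "Despesas Eventuais e Diversas",
--     "MULTAS PUNITIVAS": "Despesas Eventuais e Diversas",
--     "DOACOES E CONTRIBUICOES": "Despesas Eventuais e Diversas",
--     "CONDUCAO E TRANSPORTE": "Despesas Eventuais e Diversas",
--     "IPTU IMP PREDIAL TERRIT URBANO": "Despesas Eventuais e Diversas",
-- }
--
-- def categorizar(nome):
--     return _LOOKUP.get(nome, "Outros")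
-- ===== Notes on version B (the rewrite author's own statement) =====
-- stated objective: simpler
-- what changed: Replaced the per-category loop with list membership tests by a precomputed flat item-to-category dict and a single direct lookup with the default category; valid because no item appears in two categories.
import Mathlib
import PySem

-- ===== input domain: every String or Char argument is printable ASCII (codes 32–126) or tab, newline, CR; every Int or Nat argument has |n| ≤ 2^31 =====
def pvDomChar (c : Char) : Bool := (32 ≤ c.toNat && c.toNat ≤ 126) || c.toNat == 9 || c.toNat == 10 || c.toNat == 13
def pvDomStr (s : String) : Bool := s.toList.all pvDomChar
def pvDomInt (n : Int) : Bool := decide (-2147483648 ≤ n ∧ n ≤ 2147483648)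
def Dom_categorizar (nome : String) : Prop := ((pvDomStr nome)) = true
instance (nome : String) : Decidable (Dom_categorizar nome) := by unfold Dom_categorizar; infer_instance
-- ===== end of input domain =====

-- B replaces A's per-category loop with membership tests by one precomputed flat
-- item→category dict and a single lookup (objective: simpler).

-- ===== PORT A =====
-- A's categorias dict, as an insertion-ordered association list.
def categoriasA : List (String × List String) :=
  [ ("Despesas Operacionais",
      ["SERVICOS DE PUBLICIDADE E PROP", "MARKETING DIRETO", "SERVICO DE DIVULGACAO",
       "CONSULTORIA", "LICENCA DE USO", "SERVICOS INFORMATICA", "SERVICOS LIMPEZA E CONSERVACAO",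
       "CERTIFICADO DIGITAL"]),
    ("Despesas Administrativas",
      ["ALUGUEL DE IMOVEIS", "CONDOMINIO", "ENERGIA ELETRICA", "TELEFONIA MOVEL",
       "TELEFONIA FIXA", "MATERIAL DE EXPEDIENTE"]),
    ("Despesas Financeiras e Tributárias",
      ["TARIFAS BANCARIAS", "IOF", "JUROS PAGOS", "IRRF APLICACAO FINANCEIRA",
       "SIMPLES NACIONAL", "EMOLUMENTOS CARTORIOS", "TAXAS MUNICIPAIS",
       "CIM CADASTRO INSCRICAO MUNICIP"]),
    ("Despesas com Pessoal",
      ["PRO LABORE", "INSS SOBRE PRO LABORE", "CONFRATERNIZACAO", "CURSOS E TREINAMENTOS",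
       "LANCHES E REFEICOES"]),
    ("Investimentos e Aplicações",
      ["APLICACAO ITAU AUTO MAIS", "RESGATE ITAU AUTO MAIS", "RESGATE INTER CDB MAIS",
       "APLICACAO INTER CDB MAIS", "AJUSTE DE RENDIMENTO APLICACAO",
       "RENDIMENTO DE APLICACOES FINAN", "CONSORCIO ITAU"]),
    ("Despesas Eventuais e Diversas",
      ["ADIANT. DE LUCRO", "ADIANTAMENTO DE CLIENTES", "ENTRADAS DE TRANSFERENCIAS",
       "PAGAMENTOS DIVERSOS", "OUTRAS DESPESAS", "SEGUROS PESSOAIS E EMPRESARIAI",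
       "MULTAS PUNITIVAS", "DOACOES E CONTRIBUICOES", "CONDUCAO E TRANSPORTE",
       "IPTU IMP PREDIAL TERRIT URBANO"]) ]

-- the 'for categoria, itens in categorias.items(): if nome in itens: return categoria' loop
def catLoopA (nome : String) : List (String × List String) → String
  | [] => "Outros"
  | (categoria, itens) :: rest =>
      if itens.contains nome then categoria else catLoopA nome rest

def categorizar (nome : String) : String := catLoopA nome categoriasA

-- ===== PORT B =====
-- B's flat literal dict _LOOKUP (item → category), insertion order as in Source B.
def lookupB : PySem.Dict String String :=
  PySem.Dict.mk
    [ ("SERVICOS DE PUBLICIDADE E PROP", "Despesas Operacionais"),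
      ("MARKETING DIRETO", "Despesas Operacionais"),
      ("SERVICO DE DIVULGACAO", "Despesas Operacionais"),
      ("CONSULTORIA", "Despesas Operacionais"),
      ("LICENCA DE USO", "Despesas Operacionais"),
      ("SERVICOS INFORMATICA", "Despesas Operacionais"),
      ("SERVICOS LIMPEZA E CONSERVACAO", "Despesas Operacionais"),
      ("CERTIFICADO DIGITAL", "Despesas Operacionais"),
      ("ALUGUEL DE IMOVEIS", "Despesas Administrativas"),
      ("CONDOMINIO", "Despesas Administrativas"),
      ("ENERGIA ELETRICA", "Despesas Administrativas"),
      ("TELEFONIA MOVEL", "Despesas Administrativas"),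
      ("TELEFONIA FIXA", "Despesas Administrativas"),
      ("MATERIAL DE EXPEDIENTE", "Despesas Administrativas"),
      ("TARIFAS BANCARIAS", "Despesas Financeiras e Tributárias"),
      ("IOF", "Despesas Financeiras e Tributárias"),
      ("JUROS PAGOS", "Despesas Financeiras e Tributárias"),
      ("IRRF APLICACAO FINANCEIRA", "Despesas Financeiras e Tributárias"),
      ("SIMPLES NACIONAL", "Despesas Financeiras e Tributárias"),
      ("EMOLUMENTOS CARTORIOS", "Despesas Financeiras e Tributárias"),
      ("TAXAS MUNICIPAIS", "Despesas Financeiras e Tributárias"),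
      ("CIM CADASTRO INSCRICAO MUNICIP", "Despesas Financeiras e Tributárias"),
      ("PRO LABORE", "Despesas com Pessoal"),
      ("INSS SOBRE PRO LABORE", "Despesas com Pessoal"),
      ("CONFRATERNIZACAO", "Despesas com Pessoal"),
      ("CURSOS E TREINAMENTOS", "Despesas com Pessoal"),
      ("LANCHES E REFEICOES", "Despesas com Pessoal"),
      ("APLICACAO ITAU AUTO MAIS", "Investimentos e Aplicações"),
      ("RESGATE ITAU AUTO MAIS", "Investimentos e Aplicações"),
      ("RESGATE INTER CDB MAIS", "Investimentos e Aplicações"),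
      ("APLICACAO INTER CDB MAIS", "Investimentos e Aplicações"),
      ("AJUSTE DE RENDIMENTO APLICACAO", "Investimentos e Aplicações"),
      ("RENDIMENTO DE APLICACOES FINAN", "Investimentos e Aplicações"),
      ("CONSORCIO ITAU", "Investimentos e Aplicações"),
      ("ADIANT. DE LUCRO", "Despesas Eventuais e Diversas"),
      ("ADIANTAMENTO DE CLIENTES", "Despesas Eventuais e Diversas"),
      ("ENTRADAS DE TRANSFERENCIAS", "Despesas Eventuais e Diversas"),
      ("PAGAMENTOS DIVERSOS", "Despesas Eventuais e Diversas"),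
      ("OUTRAS DESPESAS", "Despesas Eventuais e Diversas"),
      ("SEGUROS PESSOAIS E EMPRESARIAI", "Despesas Eventuais e Diversas"),
      ("MULTAS PUNITIVAS", "Despesas Eventuais e Diversas"),
      ("DOACOES E CONTRIBUICOES", "Despesas Eventuais e Diversas"),
      ("CONDUCAO E TRANSPORTE", "Despesas Eventuais e Diversas"),
      ("IPTU IMP PREDIAL TERRIT URBANO", "Despesas Eventuais e Diversas") ]

def categorizar_alt (nome : String) : String := lookupB.getD nome "Outros"

-- ===== PRECONDITION & SPEC =====
def Spec_categorizar (nome : String) (out : String) : Prop := out = categorizar_alt nome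
instance (nome : String) (out : String) : Decidable (Spec_categorizar nome out) := by unfold Spec_categorizar; infer_instance

-- ===== CLAIM (what is proved, stated in full; the proofs are below) =====
def Claim_equal_categorizar : Prop := ∀ (nome : String), Dom_categorizar nome → Spec_categorizar nome (categorizar nome)

-- ===== LEMMAS AND PROOFS =====

-- lookup in the flattening of one category's items, prefixed to the rest
theorem getD_mk_map_append (nome c d : String) (its : List String) (rest : List (String × String)) :
    (PySem.Dict.mk (its.map (fun it => (it, c)) ++ rest)).getD nome d
      = if its.contains nome then c else (PySem.Dict.mk rest).getD nome d := by
  induction its with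
  | nil => simp
  | cons it its ih =>
      by_cases h : it = nome
      · subst h; simp [PySem.Dict.getD_eq_get?_getD, PySem.Dict.get?_mk_cons]
      · simp only [PySem.Dict.getD_eq_get?_getD] at ih
        simp [PySem.Dict.getD_eq_get?_getD, PySem.Dict.get?_mk_cons, Ne.symm h, h, ih]

-- A's loop over the category list equals the flat-dict lookup on its flattening
theorem catLoopA_eq_flat (nome : String) (cats : List (String × List String)) :
    catLoopA nome cats
      = (PySem.Dict.mk (cats.flatMap (fun p => p.2.map (fun it => (it, p.1))))).getD nome "Outros" := by
  induction cats with
  | nil => simp [catLoopA, PySem.Dict.getD_eq_get?_getD, PySem.Dict.get?]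
  | cons p rest ih =>
      obtain ⟨c, its⟩ := p
      simp only [catLoopA, List.flatMap_cons, getD_mk_map_append]
      rw [ih]

-- ===== VERDICT (by name: the statement is the Claim_ definition above) =====
theorem categorizar_spec : Claim_equal_categorizar := by
  intro nome _
  show categorizar nome = categorizar_alt nome
  rw [categorizar, catLoopA_eq_flat]
  rfl
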